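-- pv_equiv track=rewrite | github.com/aiyyappann/EchoVision | app.py | convert_text_to_braille
-- ===== SOURCE A (Python) =====
-- BRAILLE_MAP = {
--     'a': '⠁', 'b': '⠃', 'c': '⠉', 'd': '⠙', 'e': '⠑',
--     'f': '⠋', 'g': '⠛', 'h': '⠓', 'i': '⠊', 'j': '⠚',
--     'k': '⠅', 'l': '⠇', 'm': '⠍', 'n': '⠝', 'o': '⠕',
--     'p': '⠏', 'q': '⠟', 'r': '⠗', 's': '⠎', 't': '⠞',
--     'u': '⠥', 'v': '⠧', 'w': '⠺', 'x': '⠭', 'y': '⠽',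
--     'z': '⠵'
-- }
--
-- PUNCTUATION_MAP = {
--     ',': '⠠⠂',
--     '.': '⠲',
--     '!': '⠖',
--     '?': '⠦',
--     ';': '⠆',
--     ':': '⠒',
--     '-': '⠤',
--     "'": '⠄',
--     '"': '⠐⠦',
--     '(': '⠷',
--     ')': '⠾'
-- }
--
-- DIGIT_MAP = {
--     '1': '⠁', '2': '⠃', '3': '⠉', '4': '⠙', '5': '⠑',
--     '6': '⠋', '7': '⠛', '8': '⠓', '9': '⠊', '0': '⠚'
-- }
--
-- NUMBER_INDICATOR = '⠼'
--
-- CONTRACTIONS = {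
--     "and": "⠯",   # contraction for "and"
--     "for": "⠿",   # contraction for "for"
--     "of": "⠷",    # contraction for "of"
--     "the": "⠮",   # contraction for "the"
--     "with": "⠾"   # contraction for "with"
-- }
--
-- def convert_text_to_braille(text):
--     """
--     Convert text to Braille with extended mappings:
--       - Lowercase letters using BRAILLE_MAP.
--       - Uppercase letters are prefixed with the capital indicator (⠠).
--       - Punctuation uses PUNCTUATION_MAP.
--       - Digits are prefixed with NUMBER_INDICATOR and then mapped via DIGIT_MAP.
--       - Basic Grade‑2 contractions for common words.
--     """
--     # Split text into words so we can check for contractions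
--     words = text.split()
--     converted_words = []
--     for word in words:
--         lower_word = word.lower()
--         if lower_word in CONTRACTIONS:
--             # Add capital indicator if the original word starts with uppercase
--             if word[0].isupper():
--                 converted_words.append("⠠" + CONTRACTIONS[lower_word])
--             else:
--                 converted_words.append(CONTRACTIONS[lower_word])
--         else:
--             converted_chars = []
--             # We use a flag to check if the previous character was a digit
--             prev_digit = False
--             for ch in word:
--                 if ch.isalpha():
--                     # Reset digit flag
--                     prev_digit = False
--                     if ch.isupper():
--                         converted_chars.append("⠠" + BRAILLE_MAP.get(ch.lower(), ch))
--                     else: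
--                         converted_chars.append(BRAILLE_MAP.get(ch, ch))
--                 elif ch.isdigit():
--                     # If previous char was not a digit, add number indicator
--                     if not prev_digit:
--                         converted_chars.append(NUMBER_INDICATOR)
--                     prev_digit = True
--                     converted_chars.append(DIGIT_MAP.get(ch, ch))
--                 elif ch in PUNCTUATION_MAP:
--                     converted_chars.append(PUNCTUATION_MAP[ch])
--                     prev_digit = False
--                 else:
--                     # For spaces or unknown characters, leave unchanged
--                     converted_chars.append(ch)
--                     prev_digit = False
--             converted_words.append(''.join(converted_chars))
--     return ' '.join(converted_words)
-- ===== SOURCE B (Python) =====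
-- BRAILLE_MAP = {
--     'a': '⠁', 'b': '⠃', 'c': '⠉', 'd': '⠙', 'e': '⠑',
--     'f': '⠋', 'g': '⠛', 'h': '⠓', 'i': '⠊', 'j': '⠚',
--     'k': '⠅', 'l': '⠇', 'm': '⠍', 'n': '⠝', 'o': '⠕',
--     'p': '⠏', 'q': '⠟', 'r': '⠗', 's': '⠎', 't': '⠞',
--     'u': '⠥', 'v': '⠧', 'w': '⠺', 'x': '⠭', 'y': '⠽',
--     'z': '⠵'
-- }
--
-- PUNCTUATION_MAP = {
--     ',': '⠠⠂', '.': '⠲', '!': '⠖', '?': '⠦', ';': '⠆',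
--     ':': '⠒', '-': '⠤', "'": '⠄', '"': '⠐⠦', '(': '⠷', ')': '⠾'
-- }
--
-- DIGIT_MAP = {
--     '1': '⠁', '2': '⠃', '3': '⠉', '4': '⠙', '5': '⠑',
--     '6': '⠋', '7': '⠛', '8': '⠓', '9': '⠊', '0': '⠚'
-- }
--
-- NUMBER_INDICATOR = '⠼'
--
-- CONTRACTIONS = {
--     "and": "⠯", "for": "⠿", "of": "⠷", "the": "⠮", "with": "⠾"
-- }
--
--
-- def _braille_char(ch):
--     """Map a single non-digit character to its Braille piece."""
--     if ch.isalpha():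
--         prefix = "⠠" if ch.isupper() else ""
--         return prefix + BRAILLE_MAP.get(ch.lower(), ch)
--     return PUNCTUATION_MAP.get(ch, ch)
--
--
-- def _braille_word(word):
--     """Convert one word: digits handled as maximal runs, one indicator per run."""
--     pieces = []
--     i = 0
--     n = len(word)
--     while i < n:
--         if word[i].isdigit():
--             j = i
--             while j < n and word[j].isdigit():
--                 j += 1
--             pieces.append(NUMBER_INDICATOR +
--                           ''.join(DIGIT_MAP.get(d, d) for d in word[i:j]))
--             i = j
--         else:
--             pieces.append(_braille_char(word[i]))
--             i += 1
--     return ''.join(pieces)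
--
--
-- def convert_text_to_braille(text):
--     converted = []
--     for word in text.split():
--         lower_word = word.lower()
--         if lower_word in CONTRACTIONS:
--             prefix = "⠠" if word[0].isupper() else ""
--             converted.append(prefix + CONTRACTIONS[lower_word])
--         else:
--             converted.append(_braille_word(word))
--     return ' '.join(converted)
-- ===== Notes on version B (the rewrite author's own statement) =====
-- stated objective: alternative
-- what changed: The stateful per-character loop threading a prev_digit flag is replaced by a group-first decomposition: each word is tokenized into maximal digit runs (emitted as one number indicator plus mapped digits) and individual non-digit characters mapped by a standalone helper.
import Mathlib
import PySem

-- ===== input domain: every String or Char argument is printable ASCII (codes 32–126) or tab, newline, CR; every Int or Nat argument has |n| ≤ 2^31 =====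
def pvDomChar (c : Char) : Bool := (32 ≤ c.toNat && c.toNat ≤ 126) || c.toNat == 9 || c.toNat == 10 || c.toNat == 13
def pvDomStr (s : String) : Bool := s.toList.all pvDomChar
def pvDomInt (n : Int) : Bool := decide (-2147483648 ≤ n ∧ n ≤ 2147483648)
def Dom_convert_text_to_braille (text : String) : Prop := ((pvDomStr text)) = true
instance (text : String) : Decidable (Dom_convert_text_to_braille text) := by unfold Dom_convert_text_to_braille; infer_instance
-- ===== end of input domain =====

-- B replaces A's flag-threaded per-character loop by a group-first decomposition
-- (maximal digit runs emitted as one indicator + mapped digits, other characters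
-- mapped independently); objective: alternative decomposition, same cost.

-- shared module constants (the Python module's literal dicts, as lookup functions)
def pvLetter : Char → Option Char
  | 'a' => some '⠁' | 'b' => some '⠃' | 'c' => some '⠉' | 'd' => some '⠙' | 'e' => some '⠑'
  | 'f' => some '⠋' | 'g' => some '⠛' | 'h' => some '⠓' | 'i' => some '⠊' | 'j' => some '⠚'
  | 'k' => some '⠅' | 'l' => some '⠇' | 'm' => some '⠍' | 'n' => some '⠝' | 'o' => some '⠕'
  | 'p' => some '⠏' | 'q' => some '⠟' | 'r' => some '⠗' | 's' => some '⠎' | 't' => some '⠞'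
  | 'u' => some '⠥' | 'v' => some '⠧' | 'w' => some '⠺' | 'x' => some '⠭' | 'y' => some '⠽'
  | 'z' => some '⠵' | _ => none

def pvPunct : Char → Option (List Char)
  | ',' => some ['⠠', '⠂'] | '.' => some ['⠲'] | '!' => some ['⠖'] | '?' => some ['⠦']
  | ';' => some ['⠆'] | ':' => some ['⠒'] | '-' => some ['⠤'] | '\'' => some ['⠄']
  | '"' => some ['⠐', '⠦'] | '(' => some ['⠷'] | ')' => some ['⠾'] | _ => none

def pvDigit : Char → Option Char
  | '1' => some '⠁' | '2' => some '⠃' | '3' => some '⠉' | '4' => some '⠙' | '5' => some '⠑'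
  | '6' => some '⠋' | '7' => some '⠛' | '8' => some '⠓' | '9' => some '⠊' | '0' => some '⠚'
  | _ => none

def pvContr (w : List Char) : Option Char :=
  if w = ['a','n','d'] then some '⠯'
  else if w = ['f','o','r'] then some '⠿'
  else if w = ['o','f'] then some '⠷'
  else if w = ['t','h','e'] then some '⠮'
  else if w = ['w','i','t','h'] then some '⠾'
  else none

-- ===== PORT A =====
-- one step of A's per-character loop; state = (converted_chars, prev_digit)
def pvStepA (st : List (List Char) × Bool) (ch : Char) : List (List Char) × Bool :=
  if PySem.Chars.isalpha ch then
    if PySem.Chars.isupper ch then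
      (st.1 ++ ['⠠' :: (match pvLetter (PySem.Chars.lowerChar ch) with
                        | some b => [b] | none => [ch])], false)
    else
      (st.1 ++ [(match pvLetter ch with | some b => [b] | none => [ch])], false)
  else if PySem.Chars.isdigit ch then
    ((if !st.2 then st.1 ++ [['⠼']] else st.1) ++
       [(match pvDigit ch with | some b => [b] | none => [ch])], true)
  else
    match pvPunct ch with
    | some p => (st.1 ++ [p], false)
    | none => (st.1 ++ [[ch]], false)

-- one word of A; word comes from split() so it is nonempty (headD default unreachable)
def pvWordA (w : List Char) : List Char :=
  match pvContr (PySem.Chars.lower w) with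
  | some b => if PySem.Chars.isupper (w.headD ' ') then ['⠠', b] else [b]
  | none => ((w.foldl pvStepA ([], false)).1).flatten

def convert_text_to_braille (text : String) : String :=
  PySem.Str.join " " ((PySem.Str.split₀ text).map (fun w => String.mk (pvWordA w.toList)))

-- ===== PORT B =====
-- B's _braille_char: map one non-digit character
def pvCharB (ch : Char) : List Char :=
  if PySem.Chars.isalpha ch then
    (if PySem.Chars.isupper ch then ['⠠'] else []) ++
      (match pvLetter (PySem.Chars.lowerChar ch) with | some b => [b] | none => [ch])
  else
    match pvPunct ch with | some p => p | none => [ch]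

-- B's _braille_word: consume maximal digit runs, one indicator per run
def pvWordBody : List Char → List Char
  | [] => []
  | c :: rest =>
    if h : PySem.Chars.isdigit c then
      ('⠼' :: ((c :: rest).takeWhile PySem.Chars.isdigit).flatMap
                (fun d => match pvDigit d with | some b => [b] | none => [d]))
        ++ pvWordBody ((c :: rest).dropWhile PySem.Chars.isdigit)
    else
      pvCharB c ++ pvWordBody rest
  termination_by cs => cs.length
  decreasing_by
    · simp only [List.dropWhile_cons_of_pos h, List.length_cons]
      exact Nat.lt_succ_of_le (List.length_dropWhile_le _ _)
    · simp

def pvWordB (w : List Char) : List Char :=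
  match pvContr (PySem.Chars.lower w) with
  | some b => (if PySem.Chars.isupper (w.headD ' ') then ['⠠'] else []) ++ [b]
  | none => pvWordBody w

def convert_text_to_braille_alt (text : String) : String :=
  PySem.Str.join " " ((PySem.Str.split₀ text).map (fun w => String.mk (pvWordB w.toList)))

-- ===== PRECONDITION & SPEC =====
def Spec_convert_text_to_braille (text : String) (out : String) : Prop := out = convert_text_to_braille_alt text
instance (text : String) (out : String) : Decidable (Spec_convert_text_to_braille text out) := by unfold Spec_convert_text_to_braille; infer_instance

-- ===== CLAIM (what is proved, stated in full; the proofs are below) =====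
def Claim_equal_convert_text_to_braille : Prop := ∀ (text : String), Dom_convert_text_to_braille text → Spec_convert_text_to_braille text (convert_text_to_braille text)

-- ===== LEMMAS AND PROOFS =====

theorem pv_digit_not_alpha {c : Char} (h : PySem.Chars.isdigit c = true) :
    PySem.Chars.isalpha c = false := by
  simp only [PySem.Chars.isdigit, PySem.Chars.isalpha, PySem.Chars.isupper, PySem.Chars.islower,
    Bool.and_eq_true, decide_eq_true_eq, Bool.or_eq_false_iff, Bool.and_eq_false_iff,
    decide_eq_false_iff_not, Char.le_def, UInt32.le_iff_toNat_le] at *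
  have hv : ('0'.val.toNat = 48) ∧ ('9'.val.toNat = 57) ∧ ('A'.val.toNat = 65) ∧
      ('Z'.val.toNat = 90) ∧ ('a'.val.toNat = 97) ∧ ('z'.val.toNat = 122) := by decide
  obtain ⟨e1, e2, e3, e4, e5, e6⟩ := hv
  constructor <;> [left; left] <;> omega

-- the digit-run mapping used by pvWordBody
theorem pv_loop_invariant (cs : List Char) : ∀ (prev : Bool) (acc : List (List Char)),
    ((cs.foldl pvStepA (acc, prev)).1).flatten =
      acc.flatten ++
        (if prev then
          (cs.takeWhile PySem.Chars.isdigit).flatMap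
            (fun d => match pvDigit d with | some b => [b] | none => [d]) ++
            pvWordBody (cs.dropWhile PySem.Chars.isdigit)
        else pvWordBody cs) := by
  induction cs with
  | nil => intro prev acc; cases prev <;> simp [pvWordBody]
  | cons c rest ih =>
    intro prev acc
    by_cases hd : PySem.Chars.isdigit c = true
    · have ha := pv_digit_not_alpha hd
      cases prev with
      | false =>
        simp only [List.foldl_cons, pvStepA, ha, hd, if_false, if_true, Bool.not_false,
          Bool.false_eq_true]
        rw [ih true]
        rw [pvWordBody]
        simp [hd, List.takeWhile_cons_of_pos hd, List.dropWhile_cons_of_pos hd]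
      | true =>
        simp only [List.foldl_cons, pvStepA, ha, hd, Bool.not_true, if_false, if_true,
          Bool.false_eq_true]
        rw [ih true]
        simp [List.takeWhile_cons_of_pos hd, List.dropWhile_cons_of_pos hd]
    · have hstep : pvStepA (acc, prev) c = (acc ++ [pvCharB c], false) := by
        by_cases haℓ : PySem.Chars.isalpha c = true
        · by_cases hu : PySem.Chars.isupper c = true
          · simp [pvStepA, pvCharB, haℓ, hu]
          · have hlow : PySem.Chars.lowerChar c = c := by
              simp [PySem.Chars.lowerChar, hu]
            simp [pvStepA, pvCharB, haℓ, hu, hlow]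
        · simp only [pvStepA, pvCharB, haℓ, hd]
          cases hp : pvPunct c <;> simp
      cases prev with
      | false =>
        simp only [List.foldl_cons, hstep]
        rw [ih false]
        rw [pvWordBody]
        simp [hd]
      | true =>
        simp only [List.foldl_cons, hstep]
        rw [ih false]
        simp only [List.takeWhile_cons_of_neg hd, List.dropWhile_cons_of_neg hd,
          List.flatMap_nil, List.nil_append]
        conv_rhs => rw [pvWordBody]
        simp [hd]

theorem pv_word_eq (w : List Char) : pvWordA w = pvWordB w := by
  unfold pvWordA pvWordB
  cases hc : pvContr (PySem.Chars.lower w) with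
  | some b => cases hu : PySem.Chars.isupper (w.headD ' ') <;> simp
  | none =>
    have := pv_loop_invariant w false ([] : List (List Char))
    simpa using this

-- ===== VERDICT (by name: the statement is the Claim_ definition above) =====
theorem convert_text_to_braille_spec : Claim_equal_convert_text_to_braille := by
  intro text _
  unfold Spec_convert_text_to_braille convert_text_to_braille convert_text_to_braille_alt
  congr 1
  exact List.map_congr_left (fun w _ => by rw [pv_word_eq])
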